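-- pv_equiv track=rewrite | github.com/MBDAMAO/work1 | 2.py | replace_duplicate_chars
-- ===== SOURCE A (Python) =====
-- def replace_duplicate_chars(input_str, k):
--     output_str = list(input_str)
--     replaced = [False] * len(output_str)
--     for i in range(len(output_str)):
--         if not replaced[i]:
--             for j in range(1, k + 1):
--                 if i - j >= 0 and output_str[i - j] == output_str[i]:
--                     output_str[i] = '-'
--                     replaced[i] = True
--                     break
--     return ''.join(output_str)
-- ===== SOURCE B (Python) =====
-- def replace_duplicate_chars(input_str, k):
--     if k <= 0:
--         return input_str
--     counts = {}
--     out = []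
--     for i, c in enumerate(input_str):
--         final = '-' if counts.get(c, 0) > 0 else c
--         out.append(final)
--         counts[final] = counts.get(final, 0) + 1
--         old = i - k
--         if old >= 0:
--             counts[out[old]] -= 1
--     return ''.join(out)
-- ===== Notes on version B (the rewrite author's own statement) =====
-- stated objective: faster
-- what changed: Replaces the inner scan over the previous k characters by a sliding-window character counter updated incrementally, turning O(n*k) into O(n).
import Mathlib
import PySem

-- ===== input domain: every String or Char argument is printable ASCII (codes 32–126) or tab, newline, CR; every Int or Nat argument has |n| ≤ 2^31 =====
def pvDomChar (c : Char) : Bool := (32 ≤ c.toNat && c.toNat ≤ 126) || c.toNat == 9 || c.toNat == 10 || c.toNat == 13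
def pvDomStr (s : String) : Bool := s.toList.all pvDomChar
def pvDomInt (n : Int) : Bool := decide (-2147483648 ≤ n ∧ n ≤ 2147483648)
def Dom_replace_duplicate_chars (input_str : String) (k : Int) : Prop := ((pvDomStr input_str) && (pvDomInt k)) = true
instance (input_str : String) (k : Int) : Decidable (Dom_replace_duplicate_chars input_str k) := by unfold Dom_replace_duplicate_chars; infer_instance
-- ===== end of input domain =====

-- B replaces A's inner scan over the previous k characters by a sliding-window
-- character counter updated incrementally (return value proved equal on all inputs).

-- ===== PORT A =====
-- inner 'for j in range(1, k+1)' with break: returns whether a match was found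
def pvInnerA (out : List Char) (i : Int) : List Int → Bool
  | [] => false
  | j :: js =>
    if i - j ≥ 0 ∧ PySem.List.pyGet? out (i - j) = PySem.List.pyGet? out i
    then true else pvInnerA out i js

-- outer 'for i in range(len(output_str))' carrying output_str and replaced
def pvLoopA (k : Int) (out : List Char) (repl : List Bool) : List Int → List Char
  | [] => out
  | i :: is =>
    if PySem.List.pyGet? repl i = some false then
      if pvInnerA out i (PySem.List.pyRange 1 (k + 1) 1) then
        pvLoopA k (out.set i.toNat '-') (repl.set i.toNat true) is
      else pvLoopA k out repl is
    else pvLoopA k out repl is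

def replace_duplicate_chars (input_str : String) (k : Int) : String :=
  let out := input_str.toList
  let repl := List.replicate out.length false
  String.ofList (pvLoopA k out repl (PySem.List.pyRange 0 (out.length : Int) 1))

-- ===== PORT B =====
-- sliding-window counter loop; 'counts[out[old]] -= 1' is ported via getD/insert
-- (the key is always present in Python, so this is exact)
def pvLoopB (k : Int) (counts : PySem.Dict Char Int) (out : List Char) (i : Int) :
    List Char → List Char
  | [] => out
  | c :: cs =>
    let fin := if counts.getD c 0 > 0 then '-' else c
    let out' := out ++ [fin]
    let counts' := counts.insert fin (counts.getD fin 0 + 1)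
    let counts'' :=
      if i - k ≥ 0 then
        match PySem.List.pyGet? out' (i - k) with
        | some o => counts'.insert o (counts'.getD o 0 - 1)
        | none => counts'
      else counts'
    pvLoopB k counts'' out' (i + 1) cs

def replace_duplicate_chars_alt (input_str : String) (k : Int) : String :=
  if k ≤ 0 then input_str
  else String.ofList (pvLoopB k PySem.Dict.empty [] 0 input_str.toList)

-- ===== PRECONDITION & SPEC =====
def Spec_replace_duplicate_chars (input_str : String) (k : Int) (out : String) : Prop := out = replace_duplicate_chars_alt input_str k
instance (input_str : String) (k : Int) (out : String) : Decidable (Spec_replace_duplicate_chars input_str k out) := by unfold Spec_replace_duplicate_chars; infer_instance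

-- ===== CLAIM (what is proved, stated in full; the proofs are below) =====
def Claim_equal_replace_duplicate_chars : Prop := ∀ (input_str : String) (k : Int), Dom_replace_duplicate_chars input_str k → Spec_replace_duplicate_chars input_str k (replace_duplicate_chars input_str k)

-- ===== LEMMAS AND PROOFS =====

-- reference computation: finals built left to right, window = last k finals
def pvRef (kn : Nat) (pref : List Char) : List Char → List Char
  | [] => pref
  | c :: cs =>
    pvRef kn (pref ++ [if c ∈ pref.drop (pref.length - kn) then '-' else c]) cs




theorem pvInnerA_iff (out : List Char) (i : Int) (js : List Int) :
    pvInnerA out i js = true ↔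
      ∃ j ∈ js, i - j ≥ 0 ∧ PySem.List.pyGet? out (i - j) = PySem.List.pyGet? out i := by
  induction js with
  | nil => simp [pvInnerA]
  | cons j js ih =>
    simp only [pvInnerA, List.mem_cons]
    split_ifs with h
    · exact ⟨fun _ => ⟨j, Or.inl rfl, h⟩, fun _ => rfl⟩
    · rw [ih]
      constructor
      · rintro ⟨a, ha, hp⟩; exact ⟨a, Or.inr ha, hp⟩
      · rintro ⟨a, (rfl | ha), hp⟩
        · exact absurd hp h
        · exact ⟨a, ha, hp⟩

theorem pvLoopA_of_k_nonpos (k : Int) (hk : k ≤ 0) (is : List Int)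
    (out : List Char) (repl : List Bool) : pvLoopA k out repl is = out := by
  induction is generalizing out repl with
  | nil => rfl
  | cons i is ih =>
    simp only [pvLoopA, PySem.List.pyRange_one_eq_nil (by omega : k + 1 ≤ 1)]
    have h0 : pvInnerA out i [] = false := rfl
    rw [h0]
    simp only [Bool.false_eq_true, if_false]
    split_ifs <;> exact ih out repl

theorem pvInnerA_window (pref : List Char) (c : Char) (cs : List Char) (k : Int) (hk : 1 ≤ k) :
    (pvInnerA (pref ++ c :: cs) (pref.length : Int) (PySem.List.pyRange 1 (k + 1) 1) = true) ↔
      c ∈ pref.drop (pref.length - k.toNat) := by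
  rw [pvInnerA_iff]
  have hi : PySem.List.pyGet? (pref ++ c :: cs) (pref.length : Int) = some c :=
    PySem.List.pyGet?_append_length _ _ _
  constructor
  · rintro ⟨j, hjmem, hge, heq⟩
    rw [PySem.List.mem_pyRange_one] at hjmem
    rw [hi] at heq
    rw [PySem.List.pyGet?_of_nonneg _ hge] at heq
    have hlt : ((pref.length : Int) - j).toNat < pref.length := by omega
    rw [List.getElem?_append_left hlt] at heq
    rw [List.mem_iff_getElem?]
    refine ⟨((pref.length : Int) - j).toNat - (pref.length - k.toNat), ?_⟩
    rw [List.getElem?_drop]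
    have h2 : pref.length - k.toNat + (((pref.length : Int) - j).toNat - (pref.length - k.toNat))
        = ((pref.length : Int) - j).toNat := by omega
    rw [h2]; exact heq
  · intro hmem
    rw [List.mem_iff_getElem?] at hmem
    obtain ⟨m, hm⟩ := hmem
    rw [List.getElem?_drop] at hm
    obtain ⟨hlt, -⟩ := List.getElem?_eq_some_iff.mp hm
    set d := pref.length - k.toNat with hd
    refine ⟨(pref.length - (d + m) : Nat), ?_, ?_, ?_⟩
    · rw [PySem.List.mem_pyRange_one]; omega
    · omega
    · have h3 : (pref.length : Int) - (pref.length - (d + m) : Nat) = ((d + m : Nat) : Int) := by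
        omega
      rw [h3, PySem.List.pyGet?_natCast, hi,
        List.getElem?_append_left (by omega : d + m < pref.length)]
      exact hm

theorem pvSet_append_length {α : Type} (l₁ l₂ : List α) (c x : α) :
    (l₁ ++ c :: l₂).set l₁.length x = l₁ ++ x :: l₂ := by
  induction l₁ with
  | nil => rfl
  | cons a l ih => simp [ih]

theorem pvLoopA_eq_ref (k : Int) (hk : 1 ≤ k) (rest pref : List Char) (repl : List Bool)
    (hlen : repl.length = pref.length + rest.length)
    (hrepl : ∀ m : Nat, pref.length ≤ m → m < repl.length → repl[m]? = some false) :
    pvLoopA k (pref ++ rest) repl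
        (PySem.List.pyRange (pref.length : Int) ((pref.length : Int) + rest.length) 1)
      = pvRef k.toNat pref rest := by
  induction rest generalizing pref repl with
  | nil =>
    rw [PySem.List.pyRange_one_eq_nil (by simp)]
    simp [pvLoopA, pvRef]
  | cons c cs ih =>
    rw [PySem.List.pyRange_one_cons (by simp)]
    simp only [pvLoopA]
    have hget : PySem.List.pyGet? repl (pref.length : Int) = some false := by
      rw [PySem.List.pyGet?_natCast]
      exact hrepl _ le_rfl (by simp at hlen ⊢; omega)
    rw [hget, if_pos rfl]
    by_cases hmem : c ∈ pref.drop (pref.length - k.toNat)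
    · rw [if_pos ((pvInnerA_window pref c cs k hk).mpr hmem)]
      have h1 : ((pref.length : Int)).toNat = pref.length := by omega
      rw [h1, pvSet_append_length]
      simp only [pvRef, if_pos hmem]
      have := ih (pref ++ ['-']) (repl.set pref.length true)
        (by simp at hlen ⊢; omega)
        (by
          intro m hm hmlt
          rw [List.getElem?_set_ne (by simp at hm; omega)]
          exact hrepl m (by simp at hm; omega) (by simpa using hmlt))
      have e1 : pref ++ '-' :: cs = (pref ++ ['-']) ++ cs := by simp
      have e2 : (pref.length : Int) + 1 = (((pref ++ ['-']).length : Nat) : Int) := by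
        simp only [List.length_append, List.length_cons, List.length_nil]; push_cast; omega
      have e3 : (pref.length : Int) + ((c :: cs).length : Int)
          = (((pref ++ ['-']).length : Nat) : Int) + (cs.length : Int) := by
        simp only [List.length_append, List.length_cons, List.length_nil]; push_cast; omega
      rw [e1, e2, e3, this]
    · rw [if_neg (by rw [pvInnerA_window pref c cs k hk]; exact hmem)]
      simp only [pvRef, if_neg hmem]
      have := ih (pref ++ [c]) repl (by simp at hlen ⊢; omega)
        (by intro m hm hmlt; exact hrepl m (by simp at hm; omega) hmlt)
      have e1 : pref ++ c :: cs = (pref ++ [c]) ++ cs := by simp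
      have e2 : (pref.length : Int) + 1 = (((pref ++ [c]).length : Nat) : Int) := by
        simp only [List.length_append, List.length_cons, List.length_nil]; push_cast; omega
      have e3 : (pref.length : Int) + ((c :: cs).length : Int)
          = (((pref ++ [c]).length : Nat) : Int) + (cs.length : Int) := by
        simp only [List.length_append, List.length_cons, List.length_nil]; push_cast; omega
      rw [e1, e2, e3, this]

theorem pvLoopB_eq_ref (k : Int) (hk : 1 ≤ k) (rest out : List Char)
    (counts : PySem.Dict Char Int)
    (hc : ∀ x, counts.getD x 0 = ((out.drop (out.length - k.toNat)).count x : Int)) :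
    pvLoopB k counts out (out.length : Int) rest = pvRef k.toNat out rest := by
  induction rest generalizing out counts with
  | nil => rfl
  | cons c cs ih =>
    have hkk : k = (k.toNat : Int) := by omega
    simp only [pvLoopB, pvRef]
    have hF : (if counts.getD c 0 > 0 then '-' else c)
        = (if c ∈ out.drop (out.length - k.toNat) then '-' else c) := by
      rw [hc]
      by_cases h : c ∈ out.drop (out.length - k.toNat)
      · rw [if_pos (by exact_mod_cast List.count_pos_iff.mpr h), if_pos h]
      · rw [if_neg (by simp [List.count_eq_zero_of_not_mem h]), if_neg h]
    rw [hF]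
    set fin := if c ∈ out.drop (out.length - k.toNat) then '-' else c with hfin
    clear_value fin
    clear hfin hF
    have e2 : (out.length : Int) + 1 = (((out ++ [fin]).length : Nat) : Int) := by
      simp only [List.length_append, List.length_cons, List.length_nil]; push_cast; omega
    rw [e2]
    apply ih
    intro x
    by_cases hcase : (out.length : Int) - k ≥ 0
    · have hd : k.toNat ≤ out.length := by omega
      have hdlt : out.length - k.toNat < out.length := by omega
      have hi : (out.length : Int) - k = ((out.length - k.toNat : Nat) : Int) := by omega
      rw [if_pos hcase, hi, PySem.List.pyGet?_natCast,
        List.getElem?_append_left hdlt, List.getElem?_eq_getElem hdlt]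
      rw [PySem.Dict.getD_insert, PySem.Dict.getD_insert, PySem.Dict.getD_insert]
      have hwin : (out ++ [fin]).drop ((out ++ [fin]).length - k.toNat)
          = out.drop (out.length - k.toNat + 1) ++ [fin] := by
        rw [List.drop_append_of_le_length (by simp only [List.length_append, List.length_cons, List.length_nil]; omega)]
        congr 2
        simp only [List.length_append, List.length_cons, List.length_nil]; omega
      have hsplit : out.drop (out.length - k.toNat)
          = out[out.length - k.toNat] :: out.drop (out.length - k.toNat + 1) :=
        List.drop_eq_getElem_cons hdlt
      rw [hwin]
      have key : (((out.drop (out.length - k.toNat + 1) ++ [fin]).count x : Nat) : Int)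
          = ((out.drop (out.length - k.toNat)).count x : Int)
            + (if fin = x then 1 else 0) - (if out[out.length - k.toNat] = x then 1 else 0) := by
        rw [hsplit]
        simp only [List.count_append, List.count_cons, List.count_nil, beq_iff_eq]
        split_ifs <;> push_cast <;> omega
      rw [key]
      by_cases hx1 : x = out[out.length - k.toNat]
      · by_cases hf : x = fin
        · subst hf
          rw [if_pos hx1, if_pos hx1.symm, if_pos rfl, if_pos hx1.symm, hc]
        · have h2 : ¬ out[out.length - k.toNat] = fin := fun h => hf (hx1.trans h)
          rw [if_pos hx1, if_neg h2, if_neg (fun h : fin = x => hf h.symm), if_pos hx1.symm, hc, hx1]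
          omega
      · by_cases hf : x = fin
        · subst hf
          rw [if_neg hx1, if_pos rfl, if_pos rfl, if_neg (fun h : out[out.length - k.toNat] = x => hx1 h.symm), hc]
          omega
        · rw [if_neg hx1, if_neg hf, if_neg (fun h : fin = x => hf h.symm),
            if_neg (fun h : out[out.length - k.toNat] = x => hx1 h.symm), hc]
          omega
    · have hd : out.length < k.toNat := by omega
      rw [if_neg hcase, PySem.Dict.getD_insert]
      have hwin : (out ++ [fin]).drop ((out ++ [fin]).length - k.toNat) = out ++ [fin] := by
        have : (out ++ [fin]).length - k.toNat = 0 := by simp only [List.length_append, List.length_cons, List.length_nil]; omega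
        rw [this, List.drop_zero]
      have h0 : out.length - k.toNat = 0 := by omega
      rw [hwin]
      by_cases hx2 : x = fin
      · subst hx2
        rw [if_pos rfl, hc]
        simp only [List.count_append, List.count_cons, List.count_nil, List.drop_zero, beq_iff_eq, h0]
        push_cast; omega
      · rw [if_neg hx2, hc]
        simp only [List.count_append, List.count_cons, List.count_nil, List.drop_zero, beq_iff_eq, h0,
          if_neg (fun h : fin = x => hx2 h.symm)]
        push_cast; omega

theorem pv_final : ∀ (input_str : String) (k : Int),
    replace_duplicate_chars input_str k = replace_duplicate_chars_alt input_str k := by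
  intro s k
  simp only [replace_duplicate_chars, replace_duplicate_chars_alt]
  by_cases hk : k ≤ 0
  · rw [if_pos hk, pvLoopA_of_k_nonpos k hk]
    exact String.ofList_toList
  · have hk1 : 1 ≤ k := by omega
    rw [if_neg hk]
    have hA := pvLoopA_eq_ref k hk1 s.toList [] (List.replicate s.toList.length false)
      (by simp) (by intro m _ hm; simp at hm; simp [hm])
    have hB := pvLoopB_eq_ref k hk1 s.toList [] PySem.Dict.empty
      (by intro x; simp [PySem.Dict.getD])
    simp only [List.nil_append, List.length_nil, Nat.cast_zero, zero_add] at hA hB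
    rw [hA, hB]

-- ===== VERDICT (by name: the statement is the Claim_ definition above) =====
theorem replace_duplicate_chars_spec : Claim_equal_replace_duplicate_chars := by
  intro input_str k _
  unfold Spec_replace_duplicate_chars
  exact pv_final input_str k
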